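-- pv_equiv track=rewrite | github.com/neoCheck/advent_of_code | 2015/11/day_11.py | has_increasing_straight
-- ===== SOURCE A (Python) =====
-- def has_increasing_straight(password: str) -> bool:
--     straight_list = [
--         'abc', 'bcd', 'cde', 'def', 'efg', 'fgh', 'ghi',
--         'hij', 'ijk', 'jkl', 'klm', 'lmn', 'mno', 'nop',
--         'opq', 'pqr', 'qrs', 'rst', 'stu', 'tuv', 'uvw',
--         'vwx', 'wxy', 'xyz'
--     ]
--
--     for straight in straight_list:
--         if straight in password:
--             return True
--
--     return False
-- ===== SOURCE B (Python) =====
-- def has_increasing_straight(password: str) -> bool: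
--     for i in range(len(password) - 2):
--         c = password[i]
--         if 'a' <= c <= 'x' and password[i + 1] == chr(ord(c) + 1) and password[i + 2] == chr(ord(c) + 2):
--             return True
--     return False
-- ===== Notes on version B (the rewrite author's own statement) =====
-- stated objective: idiomatic
-- what changed: Replaces the 24 precomputed substring membership tests with a single positional scan using ordinal arithmetic on consecutive characters.
import Mathlib
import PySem

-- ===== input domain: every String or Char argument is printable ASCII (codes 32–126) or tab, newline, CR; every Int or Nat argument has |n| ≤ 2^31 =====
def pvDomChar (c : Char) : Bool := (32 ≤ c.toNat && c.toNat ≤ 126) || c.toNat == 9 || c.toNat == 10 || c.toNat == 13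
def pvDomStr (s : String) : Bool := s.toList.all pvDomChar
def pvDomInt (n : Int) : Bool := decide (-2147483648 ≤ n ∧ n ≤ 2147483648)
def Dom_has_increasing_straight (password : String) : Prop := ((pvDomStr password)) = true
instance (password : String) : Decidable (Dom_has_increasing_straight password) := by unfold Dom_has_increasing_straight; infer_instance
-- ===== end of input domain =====

-- B replaces A's 24 precomputed substring membership tests by a single positional scan
-- using ordinal arithmetic on consecutive characters (objective: idiomatic).

-- ===== PORT A =====
def pvStraightList : List String :=
  ["abc", "bcd", "cde", "def", "efg", "fgh", "ghi",
   "hij", "ijk", "jkl", "klm", "lmn", "mno", "nop",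
   "opq", "pqr", "qrs", "rst", "stu", "tuv", "uvw",
   "vwx", "wxy", "xyz"]

-- 'for straight in straight_list: if straight in password: return True' — early-exit loop = List.any
def has_increasing_straight (password : String) : Bool :=
  pvStraightList.any (fun straight => PySem.Str.isIn straight password)

-- ===== PORT B =====
-- the scan over positions i, i+1, i+2 of Source B, as structural recursion over the characters
def pvScan : List Char → Bool
  | c :: b :: d :: rest =>
      if ('a' ≤ c ∧ c ≤ 'x') ∧ b.toNat = c.toNat + 1 ∧ d.toNat = c.toNat + 2 then true
      else pvScan (b :: d :: rest)
  | _ => false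

def has_increasing_straight_alt (password : String) : Bool :=
  pvScan password.toList

-- ===== PRECONDITION & SPEC =====
def Spec_has_increasing_straight (password : String) (out : Bool) : Prop := out = has_increasing_straight_alt password
instance (password : String) (out : Bool) : Decidable (Spec_has_increasing_straight password out) := by unfold Spec_has_increasing_straight; infer_instance

-- ===== CLAIM (what is proved, stated in full; the proofs are below) =====
def Claim_equal_has_increasing_straight : Prop := ∀ (password : String), Dom_has_increasing_straight password → Spec_has_increasing_straight password (has_increasing_straight password)

-- ===== LEMMAS AND PROOFS =====

theorem pvMemCode (k : Nat) (h1 : 97 ≤ k) (h2 : k ≤ 120) :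
    String.ofList [Char.ofNat k, Char.ofNat (k + 1), Char.ofNat (k + 2)] ∈ pvStraightList := by
  interval_cases k <;> decide

theorem pvLeToNat {a b : Char} (h : a ≤ b) : a.toNat ≤ b.toNat := h

-- the 24 strings are exactly the triples [a, a+1, a+2] with 'a' ≤ a ≤ 'x'
theorem pvStraight_iff (a b c : Char) :
    (∃ s ∈ pvStraightList, s.toList = [a, b, c]) ↔
      (('a' ≤ a ∧ a ≤ 'x') ∧ b.toNat = a.toNat + 1 ∧ c.toNat = a.toNat + 2) := by
  constructor
  · rintro ⟨s, hs, he⟩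
    fin_cases hs <;> (simp at he; obtain ⟨rfl, rfl, rfl⟩ := he) <;> refine ⟨⟨by decide, by decide⟩, by decide, by decide⟩
  · rintro ⟨⟨h1, h2⟩, hb, hc⟩
    have h1' : 97 ≤ a.toNat := pvLeToNat h1
    have h2' : a.toNat ≤ 120 := pvLeToNat h2
    refine ⟨String.ofList [a, b, c], ?_, by simp⟩
    have ha' : a = Char.ofNat a.toNat := (Char.ofNat_toNat a).symm
    have hb' : b = Char.ofNat (a.toNat + 1) := by rw [← hb, Char.ofNat_toNat]
    have hc' : c = Char.ofNat (a.toNat + 2) := by rw [← hc, Char.ofNat_toNat]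
    have hlist : [a, b, c] = [Char.ofNat a.toNat, Char.ofNat (a.toNat + 1), Char.ofNat (a.toNat + 2)] := by
      simp only [List.cons.injEq, and_true]
      exact ⟨ha', hb', hc'⟩
    rw [hlist]
    exact pvMemCode a.toNat h1' h2'

theorem pvA_iff (p : String) :
    has_increasing_straight p = true ↔
      ∃ a b c, (('a' ≤ a ∧ a ≤ 'x') ∧ b.toNat = a.toNat + 1 ∧ c.toNat = a.toNat + 2) ∧
        [a, b, c] <:+: p.toList := by
  constructor
  · intro h
    rw [has_increasing_straight, List.any_eq_true] at h
    obtain ⟨s, hs, hIn⟩ := h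
    rw [PySem.Str.isIn_iff_infix] at hIn
    have ht : ∃ a b c, s.toList = [a, b, c] := by fin_cases hs <;> exact ⟨_, _, _, rfl⟩
    obtain ⟨a, b, c, ht⟩ := ht
    exact ⟨a, b, c, (pvStraight_iff a b c).mp ⟨s, hs, ht⟩, ht ▸ hIn⟩
  · rintro ⟨a, b, c, hcond, hinf⟩
    obtain ⟨s, hs, ht⟩ := (pvStraight_iff a b c).mpr hcond
    rw [has_increasing_straight, List.any_eq_true]
    exact ⟨s, hs, by rw [PySem.Str.isIn_iff_infix, ht]; exact hinf⟩

theorem pvScan_iff (l : List Char) :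
    pvScan l = true ↔
      ∃ a b c, (('a' ≤ a ∧ a ≤ 'x') ∧ b.toNat = a.toNat + 1 ∧ c.toNat = a.toNat + 2) ∧
        [a, b, c] <:+: l := by
  induction l using pvScan.induct with
  | case1 x y z rest hcond =>
      simp only [pvScan, if_pos hcond, true_iff]
      exact ⟨x, y, z, hcond, List.IsPrefix.isInfix ⟨rest, rfl⟩⟩
  | case2 x y z rest hcond ih =>
      rw [pvScan, if_neg hcond, ih]
      constructor
      · rintro ⟨a, b, c, hc, hinf⟩
        exact ⟨a, b, c, hc, hinf.trans (List.suffix_cons x (y :: z :: rest)).isInfix⟩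
      · rintro ⟨a, b, c, hc, hinf⟩
        rcases List.infix_cons_iff.mp hinf with hpre | htail
        · obtain ⟨rfl, rfl, rfl⟩ := by simpa [List.cons_prefix_cons] using hpre
          exact absurd hc hcond
        · exact ⟨a, b, c, hc, htail⟩
  | case3 l hshape =>
      simp only [pvScan]
      constructor
      · intro h
        cases l with
        | nil => simp at h
        | cons x t => cases t with
          | nil => simp at h
          | cons y u => cases u with
            | nil => simp at h
            | cons z rest => exact absurd rfl (hshape x y z rest)
      · rintro ⟨a, b, c, _, hinf⟩
        have h3 : 3 ≤ l.length := by simpa using hinf.length_le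
        cases l with
        | nil => simp at h3
        | cons x t => cases t with
          | nil => simp at h3
          | cons y u => cases u with
            | nil => simp at h3
            | cons z rest => exact absurd rfl (hshape x y z rest)

-- ===== VERDICT (by name: the statement is the Claim_ definition above) =====
theorem has_increasing_straight_spec : Claim_equal_has_increasing_straight := by
  intro p _
  unfold Spec_has_increasing_straight has_increasing_straight_alt
  have h := (pvA_iff p).trans (pvScan_iff p.toList).symm
  cases hA : has_increasing_straight p <;> cases hB : pvScan p.toList <;> simp_all
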